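-- pv_equiv track=rewrite | github.com/AlexxSandbox/Sandbox_Python | Recursion/prizes.py | search
-- ===== SOURCE A (Python) =====
-- def all_eq(lst):
--     if not lst:
--         return True
--
--     if len(lst) == 1:
--         return True
--
--     v = lst[0]
--     for i in range(1, len(lst)):
--         if lst[i] != v:
--             return False
--
--     return True
--
-- def search(winners, coins, target):
--     if not coins:
--         return all_eq(winners)
--
--     v = coins[-1]
--
--     for i in range(len(winners)):
--         if winners[i] + v <= target:
--             winners[i] += v
--             return search(winners, coins[0:-1], target)
--
--     return False
-- ===== SOURCE B (Python) =====
-- def search(winners, coins, target):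
--     for v in reversed(coins):
--         for i in range(len(winners)):
--             if winners[i] + v <= target:
--                 winners[i] += v
--                 break
--         else:
--             return False
--     return len(set(winners)) <= 1
-- ===== Notes on version B (the rewrite author's own statement) =====
-- stated objective: simpler
-- what changed: Replaces the tail recursion that re-slices coins[0:-1] at every level by one explicit loop over reversed(coins) with an early False return, and replaces the hand-rolled all_eq index scan by len(set(winners)) <= 1.
import Mathlib
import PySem

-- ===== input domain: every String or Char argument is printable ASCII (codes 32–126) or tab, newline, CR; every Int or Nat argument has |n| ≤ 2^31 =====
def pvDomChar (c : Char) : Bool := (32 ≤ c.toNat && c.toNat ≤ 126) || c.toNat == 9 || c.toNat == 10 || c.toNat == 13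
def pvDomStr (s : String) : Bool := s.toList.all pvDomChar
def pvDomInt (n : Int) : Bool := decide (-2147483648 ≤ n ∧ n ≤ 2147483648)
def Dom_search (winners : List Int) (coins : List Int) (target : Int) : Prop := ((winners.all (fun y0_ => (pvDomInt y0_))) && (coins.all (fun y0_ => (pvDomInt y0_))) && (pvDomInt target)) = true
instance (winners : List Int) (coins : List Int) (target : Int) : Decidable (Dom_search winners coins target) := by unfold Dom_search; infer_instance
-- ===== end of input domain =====

-- B replaces A's tail recursion on coins[0:-1] by one explicit loop over reversed(coins)
-- and the hand-rolled all_eq scan by len(set(winners)) <= 1 (objective: simpler).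
-- A mutates `winners` in place; the equivalence proved here is about the RETURN value only
-- (B performs the same mutation in Python).

-- ===== PORT A =====
-- for-loop "if lst[i] != v: return False … return True" ported as .all over the index range
def all_eq (lst : List Int) : Bool :=
  if lst = [] then true
  else if lst.length = 1 then true
  else
    let v := PySem.List.pyGetD lst 0 0
    (PySem.List.pyRange 1 lst.length 1).all (fun i => PySem.List.pyGetD lst i 0 == v)

-- A's inner for-loop: first index i with winners[i] + v <= target gets v added;
-- `none` means the loop fell through (A returns False there).
def tryGive (ws : List Int) (v target : Int) : Option (List Int) :=
  match ws with
  | [] => none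
  | w :: rest =>
    if w + v ≤ target then some ((w + v) :: rest)
    else (tryGive rest v target).map (fun r => w :: r)

def search (winners : List Int) (coins : List Int) (target : Int) : Bool :=
  if coins = [] then all_eq winners
  else
    let v := PySem.List.pyGetD coins (-1) 0
    match tryGive winners v target with
    | some ws => search ws (PySem.List.slice coins (some 0) (some (-1))) target
    | none => false
termination_by coins.length
decreasing_by
  simp only [PySem.List.slice_zero_start, PySem.List.slice_to_neg_one]
  have : coins ≠ [] := by assumption
  have := List.length_pos_iff.mpr this
  simp [List.length_dropLast]; omega

-- ===== PORT B =====
-- B's inner scan: find the first fitting index, then update it in place.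
def fitFirst (ws : List Int) (v target : Int) : Option (List Int) :=
  match ws.findIdx? (fun w => decide (w + v ≤ target)) with
  | some j => some (ws.set j (ws.getD j 0 + v))
  | none => none

-- the explicit loop over reversed(coins), with early-False as `none`
def giveLoop (ws : List Int) (vs : List Int) (target : Int) : Option (List Int) :=
  vs.foldl (fun acc v => acc.bind (fun w => fitFirst w v target)) (some ws)

def search_alt (winners : List Int) (coins : List Int) (target : Int) : Bool :=
  match giveLoop winners coins.reverse target with
  | none => false
  | some ws => decide (PySem.Set.len (PySem.Set.ofList ws) ≤ 1)

-- ===== PRECONDITION & SPEC =====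
def Spec_search (winners : List Int) (coins : List Int) (target : Int) (out : Bool) : Prop := out = search_alt winners coins target
instance (winners : List Int) (coins : List Int) (target : Int) (out : Bool) : Decidable (Spec_search winners coins target out) := by unfold Spec_search; infer_instance

-- ===== CLAIM (what is proved, stated in full; the proofs are below) =====
def Claim_equal_search : Prop := ∀ (winners : List Int) (coins : List Int) (target : Int), Dom_search winners coins target → Spec_search winners coins target (search winners coins target)

-- ===== LEMMAS AND PROOFS =====

-- A's scan and B's scan produce the same optional updated list.
theorem tryGive_eq_fitFirst (ws : List Int) (v target : Int) :
    tryGive ws v target = fitFirst ws v target := by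
  induction ws with
  | nil => simp [tryGive, fitFirst]
  | cons w rest ih =>
    rw [tryGive, ih]
    unfold fitFirst
    rw [List.findIdx?_cons]
    by_cases h : w + v ≤ target
    · simp [h]
    · simp only [h, decide_false]
      cases rest.findIdx? (fun w => decide (w + v ≤ target)) with
      | none => simp
      | some j => simp

-- the dedup of a list is [x] iff every element equals x (list nonempty headed by x)
theorem set_len_le_one_iff (x : Int) (t : List Int) :
    (PySem.Set.len (PySem.Set.ofList (x :: t)) ≤ 1) ↔ (∀ y ∈ t, y = x) := by
  constructor
  · intro h y hy
    have hx : x ∈ PySem.Set.ofList (x :: t) := by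
      rw [PySem.Set.mem_ofList]; exact List.mem_cons_self
    have hy' : y ∈ PySem.Set.ofList (x :: t) := by
      rw [PySem.Set.mem_ofList]; exact List.mem_cons_of_mem _ hy
    -- a list of length ≤ 1 containing x and y forces y = x
    cases hs : PySem.Set.ofList (x :: t) with
    | nil => rw [hs] at hx; cases hx
    | cons a rest =>
      rw [hs] at hx hy' h
      have hr : rest = [] := by
        have hl : (a :: rest).length ≤ 1 := by simpa [PySem.Set.len] using h
        simpa using hl
      subst hr
      simp at hx hy'
      omega
  · intro h
    have hsub : ∀ y ∈ PySem.Set.ofList (x :: t), y = x := by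
      intro y hy
      rw [PySem.Set.mem_ofList] at hy
      rcases List.mem_cons.mp hy with h1 | h2
      · exact h1
      · exact h y h2
    have hnd : (PySem.Set.ofList (x :: t)).Nodup := PySem.Set.nodup_ofList _
    cases hs : PySem.Set.ofList (x :: t) with
    | nil => simp [PySem.Set.len]
    | cons a rest =>
      cases rest with
      | nil => simp [PySem.Set.len]
      | cons b rest' =>
        exfalso
        rw [hs] at hsub hnd
        have ha := hsub a List.mem_cons_self
        have hb := hsub b (List.mem_cons_of_mem _ List.mem_cons_self)
        simp [ha, hb] at hnd

-- A's all_eq is B's len(set(⋅)) ≤ 1 test.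
theorem all_eq_eq_set_test (ws : List Int) :
    all_eq ws = decide (PySem.Set.len (PySem.Set.ofList ws) ≤ 1) := by
  cases ws with
  | nil => simp [all_eq, PySem.Set.len]
  | cons x t =>
    have key : all_eq (x :: t) = t.all (fun y => y == x) := by
      unfold all_eq
      by_cases h1 : t = []
      · subst h1; simp
      · have hlen : (x :: t).length ≠ 1 := by
          simp [List.length_cons]
          intro h; exact h1 h
        simp only [if_neg (by simp : (x :: t) ≠ []), if_neg hlen]
        have hmap : (PySem.List.pyRange 1 ((x :: t).length : Int) 1).map
            (fun i => PySem.List.pyGetD (x :: t) i 0) = (x :: t).drop 1 := by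
          have := PySem.List.map_pyGetD_pyRange' (xs := x :: t) (a := 1) (d := 0) (by norm_num)
          simpa using this
        calc (PySem.List.pyRange 1 ((x :: t).length : Int) 1).all
              (fun i => PySem.List.pyGetD (x :: t) i 0 == PySem.List.pyGetD (x :: t) 0 0)
            = ((PySem.List.pyRange 1 ((x :: t).length : Int) 1).map
                (fun i => PySem.List.pyGetD (x :: t) i 0)).all
                (fun y => y == PySem.List.pyGetD (x :: t) 0 0) := by
              rw [List.all_map]; rfl
          _ = t.all (fun y => y == x) := by
              rw [hmap]; simp [PySem.List.pyGetD_zero_cons]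
    rw [key]
    rcases Bool.eq_false_or_eq_true (t.all (fun y => y == x)) with hb | hb <;> rw [hb]
    · symm; simp only [decide_eq_true_eq]
      rw [set_len_le_one_iff]
      simp [List.all_eq_true] at hb
      exact hb
    · symm; simp only [decide_eq_false_iff_not]
      rw [set_len_le_one_iff]
      simp at hb
      obtain ⟨y, hy, hne⟩ := hb
      intro hall; exact hne (hall y hy)

theorem giveLoop_none (vs : List Int) (target : Int) :
    vs.foldl (fun acc v => acc.bind (fun w => fitFirst w v target)) none = none := by
  induction vs with
  | nil => rfl
  | cons v vs ih => simpa using ih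

theorem search_eq_alt (coins : List Int) : ∀ (winners : List Int) (target : Int),
    search winners coins target = search_alt winners coins target := by
  induction coins using List.reverseRecOn with
  | nil =>
    intro winners target
    rw [search]
    simp [search_alt, giveLoop, all_eq_eq_set_test]
  | append_singleton cs v ih =>
    intro winners target
    rw [search]
    have hne : cs ++ [v] ≠ [] := by simp
    rw [if_neg hne]
    rw [PySem.List.pyGetD_neg_one_append_singleton]
    simp only [PySem.List.slice_zero_start, PySem.List.slice_to_neg_one,
      List.dropLast_concat]
    rw [tryGive_eq_fitFirst]
    unfold search_alt giveLoop
    rw [List.reverse_append]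
    simp only [List.reverse_cons, List.reverse_nil, List.nil_append, List.cons_append,
      List.foldl_cons, Option.bind_some]
    cases fitFirst winners v target with
    | none => rw [giveLoop_none]
    | some ws => exact ih ws target

-- ===== VERDICT (by name: the statement is the Claim_ definition above) =====
theorem search_spec : Claim_equal_search := by
  intro winners coins target _
  unfold Spec_search
  exact search_eq_alt coins winners target
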